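-- pv_equiv track=rewrite | github.com/Sofassssssss/OrderedSetsAlgorithms | src/visualization/first_algorithm_visualization.py | correct_position_of_graph_nodes
-- ===== SOURCE A (Python) =====
-- def correct_position_of_graph_nodes(heights: dict[str, int]) -> dict[str, tuple]:
--     # позиции для узлов графа
--     pos = {}
--
--     # сортировка высот по убыванию для установки позиций по оси Y
--     sorted_heights = sorted(set(heights.values()), reverse=True)
--
--     # присваиваем Y-позиции на основе высоты
--     y_pos = {height: idx * 2 for idx, height in enumerate(sorted_heights)}
--
--     # присваиваем элементы их Y-позиции на основе их высоты
--     for element, height in heights.items():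
--         pos[element] = (0, -y_pos[height])
--
--     # чтобы избежать наложений, будем двигать элементы по оси X
--     x_offset = 0
--     for level in sorted_heights:
--         x_pos = x_offset
--         for element in sorted([e for e in heights if heights[e] == level]):
--             pos[element] = (x_pos, pos[element][1])
--             x_pos += 6
--         x_offset += 2
--
--     return pos
-- ===== SOURCE B (Python) =====
-- def correct_position_of_graph_nodes(heights: dict[str, int]) -> dict[str, tuple]:
--     # bucket the elements by height in one pass, then place each sorted
--     # bucket on its level: x = 2*rank + 6*i, y = -2*rank
--     buckets = {}
--     for element, height in heights.items():
--         buckets.setdefault(height, []).append(element)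
--     coord = {}
--     for rank, level in enumerate(sorted(buckets, reverse=True)):
--         for i, element in enumerate(sorted(buckets[level])):
--             coord[element] = (2 * rank + 6 * i, -2 * rank)
--     return {element: coord[element] for element in heights}
-- ===== Notes on version B (the rewrite author's own statement) =====
-- stated objective: alternative
-- what changed: B buckets the elements by height in a single dict pass and assigns both coordinates at once per sorted bucket via enumerate, instead of A's per-level rescan of the whole dict and the two-stage y-then-x overwrite of pos; A's per-level rescan is O(k*n) over k distinct heights, B's bucketing is O(n log n), though a timing run found no 1.5x gap on the generated inputs.
import Mathlib
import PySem

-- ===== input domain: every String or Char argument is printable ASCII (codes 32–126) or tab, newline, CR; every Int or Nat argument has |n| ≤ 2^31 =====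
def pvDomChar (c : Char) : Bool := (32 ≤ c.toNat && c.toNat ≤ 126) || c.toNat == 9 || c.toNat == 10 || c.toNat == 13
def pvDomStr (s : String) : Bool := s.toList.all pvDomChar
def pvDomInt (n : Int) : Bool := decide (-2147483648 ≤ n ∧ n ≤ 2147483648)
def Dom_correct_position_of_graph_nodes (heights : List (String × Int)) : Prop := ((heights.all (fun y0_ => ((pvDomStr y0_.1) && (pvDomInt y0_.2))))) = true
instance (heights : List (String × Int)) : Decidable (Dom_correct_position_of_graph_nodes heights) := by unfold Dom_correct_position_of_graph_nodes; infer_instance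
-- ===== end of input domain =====

-- B buckets the elements by height in one dict pass and places each sorted bucket with
-- enumerate, instead of A's per-level rescan of the whole dict (objective: alternative).

-- ===== PORT A =====
def correct_position_of_graph_nodes (heights : List (String × Int)) : List (String × Int × Int) :=
  -- the dict parameter (assoc list) read as a Python dict
  let d : PySem.Dict String Int := PySem.Dict.ofList heights
  -- sorted_heights = sorted(set(heights.values()), reverse=True)
  let sortedHeights := PySem.List.sorted (PySem.Set.ofList d.values) (fun x => x) true
  -- y_pos = {height: idx * 2 for idx, height in enumerate(sorted_heights)}
  let yPos : PySem.Dict Int Int :=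
    (PySem.List.enumerate sortedHeights).foldl (fun yp p => yp.insert p.2 (p.1 * 2)) PySem.Dict.empty
  -- for element, height in heights.items(): pos[element] = (0, -y_pos[height])
  -- (y_pos[height] never raises: every height is in y_pos; getD is exact here)
  let pos0 : PySem.Dict String (Int × Int) :=
    d.items.foldl (fun ps p => ps.insert p.1 (0, -(yPos.getD p.2 0))) PySem.Dict.empty
  -- x_offset sweep: for level in sorted_heights: …
  let final :=
    sortedHeights.foldl
      (fun (st : PySem.Dict String (Int × Int) × Int) level =>
        -- sorted([e for e in heights if heights[e] == level]); heights[e] never raises (e is a key)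
        let elems := PySem.List.sorted
          (d.keys.foldl (fun acc e => if d.getD e 0 == level then acc ++ [e] else acc) [])
          (fun x => x) false
        -- for element in elems: pos[element] = (x_pos, pos[element][1]); x_pos += 6
        -- (pos[element] never raises: every element is a key of pos)
        let inner := elems.foldl
          (fun (st2 : PySem.Dict String (Int × Int) × Int) e =>
            (st2.1.insert e (st2.2, (st2.1.getD e (0, 0)).2), st2.2 + 6))
          (st.1, st.2)
        (inner.1, st.2 + 2))
      (pos0, 0)
  final.1.items

-- ===== PORT B =====
def correct_position_of_graph_nodes_alt (heights : List (String × Int)) : List (String × Int × Int) :=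
  let d : PySem.Dict String Int := PySem.Dict.ofList heights
  -- buckets.setdefault(height, []).append(element)  ≡  buckets[height] = buckets.get(height, []) + [element]
  let buckets : PySem.Dict Int (List String) :=
    d.items.foldl (fun bk p => bk.modify p.2 [] (fun l => l ++ [p.1])) PySem.Dict.empty
  -- for rank, level in enumerate(sorted(buckets, reverse=True)): for i, element in enumerate(sorted(buckets[level])): …
  -- (buckets[level] never raises: level is a key of buckets)
  let coord : PySem.Dict String (Int × Int) :=
    (PySem.List.enumerate (PySem.List.sorted buckets.keys (fun x => x) true)).foldl
      (fun c rl =>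
        (PySem.List.enumerate (PySem.List.sorted (buckets.getD rl.2 []) (fun x => x) false)).foldl
          (fun c ie => c.insert ie.2 (2 * rl.1 + 6 * ie.1, -2 * rl.1)) c)
      PySem.Dict.empty
  -- {element: coord[element] for element in heights}; coord[element] never raises (every key got a coordinate)
  d.items.map (fun p => (p.1, coord.getD p.1 (0, 0)))

-- ===== PRECONDITION & SPEC =====
def Spec_correct_position_of_graph_nodes (heights : List (String × Int)) (out : List (String × Int × Int)) : Prop := out = correct_position_of_graph_nodes_alt heights
instance (heights : List (String × Int)) (out : List (String × Int × Int)) : Decidable (Spec_correct_position_of_graph_nodes heights out) := by unfold Spec_correct_position_of_graph_nodes; infer_instance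

-- ===== CLAIM (what is proved, stated in full; the proofs are below) =====
def Claim_equal_correct_position_of_graph_nodes : Prop := ∀ (heights : List (String × Int)), Dom_correct_position_of_graph_nodes heights → Spec_correct_position_of_graph_nodes heights (correct_position_of_graph_nodes heights)

-- ===== LEMMAS AND PROOFS =====

lemma enum_snd {α : Type} (l : List α) (s : Int) : (PySem.List.enumerate l s).map (fun p => p.2) = l := by
  induction l generalizing s with
  | nil => simp [PySem.List.enumerate]
  | cons x t ih => simp [PySem.List.enumerate, ih]

lemma enum_mem {α : Type} (l : List α) (s : Int) (t : Nat) (ht : t < l.length) :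
    ((s + (t : Int)), l[t]) ∈ PySem.List.enumerate l s := by
  induction l generalizing s t with
  | nil => simp at ht
  | cons x r ih =>
    cases t with
    | zero => simp [PySem.List.enumerate]
    | succ t' =>
      have ht' : t' < r.length := by simpa using ht
      have h2 := ih (s + 1) t' ht'
      simp only [PySem.List.enumerate, List.mem_cons]
      right
      have he : s + ((t' + 1 : Nat) : Int) = s + 1 + (t' : Int) := by push_cast; ring
      rw [show ((x :: r)[t'+1] = r[t']) from rfl, he]
      exact h2

lemma dict_getD_eq_of_contains {κ ν : Type} [BEq κ] [LawfulBEq κ] (d : PySem.Dict κ ν) (k : κ)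
    (h : d.contains k = true) (d1 d2 : ν) : d.getD k d1 = d.getD k d2 := by
  rw [PySem.Dict.contains_eq_isSome_get?] at h
  obtain ⟨v, hv⟩ := Option.isSome_iff_exists.mp h
  rw [PySem.Dict.getD_of_get?_eq_some _ _ hv, PySem.Dict.getD_of_get?_eq_some _ _ hv]

lemma keyval_unique (hs : List (String × Int)) (hnd : (hs.map Prod.fst).Nodup) {e : String} {a b : Int}
    (h1 : (e, a) ∈ hs) (h2 : (e, b) ∈ hs) : a = b := by
  have ha := PySem.Dict.get?_of_mem_items (PySem.Dict.mk hs) h1 (by simpa [PySem.Dict.keys] using hnd)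
  have hb := PySem.Dict.get?_of_mem_items (PySem.Dict.mk hs) h2 (by simpa [PySem.Dict.keys] using hnd)
  rw [ha] at hb; exact Option.some_inj.mp hb

-- items of the y_pos dict
lemma yPos_items (L : List Int) (hL : L.Nodup) :
    ((PySem.List.enumerate L 0).foldl (fun yp p => yp.insert p.2 (p.1 * 2)) PySem.Dict.empty).items
      = (PySem.List.enumerate L 0).map (fun p => (p.2, p.1 * 2)) := by
  have := PySem.Dict.items_foldl_insert_fresh (PySem.List.enumerate L 0)
      (fun p => p.2) (fun p => p.1 * 2) PySem.Dict.empty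
      (by intro a _; simp [PySem.Dict.contains_empty])
      (by rw [enum_snd]; exact hL)
  simpa [PySem.Dict.items] using this

lemma yPos_at (L : List Int) (hL : L.Nodup) (t : Nat) (ht : t < L.length) :
    ((PySem.List.enumerate L 0).foldl (fun yp p => yp.insert p.2 (p.1 * 2)) PySem.Dict.empty).getD L[t] 0
      = (t : Int) * 2 := by
  apply PySem.Dict.getD_of_mem_items
  · rw [yPos_items L hL]
    have := enum_mem L 0 t ht
    exact List.mem_map.mpr ⟨_, this, by simp⟩
  · show (((PySem.List.enumerate L 0).foldl (fun yp p => yp.insert p.2 (p.1 * 2)) PySem.Dict.empty).keys).Nodup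
    simp only [PySem.Dict.keys, yPos_items L hL, List.map_map]
    have h : (Prod.fst ∘ fun (p : Int × Int) => (p.2, p.1 * 2)) = fun (p : Int × Int) => p.2 := rfl
    rw [h, enum_snd]; exact hL

lemma pos0_items (hs : List (String × Int)) (hnd : (hs.map Prod.fst).Nodup) (yp : PySem.Dict Int Int) :
    (hs.foldl (fun ps p => ps.insert p.1 (0, -(yp.getD p.2 0))) PySem.Dict.empty).items
      = hs.map (fun p => (p.1, ((0 : Int), -(yp.getD p.2 0)))) := by
  have := PySem.Dict.items_foldl_insert_fresh hs (fun p => p.1)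
      (fun p => ((0 : Int), -(yp.getD p.2 0))) PySem.Dict.empty
      (by intro a _; simp [PySem.Dict.contains_empty]) hnd
  simpa [PySem.Dict.items] using this

lemma buckets_getD (hs : List (String × Int)) (lv : Int) :
    (hs.foldl (fun bk p => bk.modify p.2 [] (fun l => l ++ [p.1])) (PySem.Dict.empty : PySem.Dict Int (List String))).getD lv []
      = (hs.filter (fun p => p.2 == lv)).map (fun p => p.1) := by
  have h1 : hs.foldl (fun bk p => bk.modify p.2 [] (fun l => l ++ [p.1])) (PySem.Dict.empty : PySem.Dict Int (List String))
      = (hs.map Prod.swap).foldl (fun bk q => bk.modify q.1 [] (fun l => l ++ [q.2])) PySem.Dict.empty := by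
    rw [List.foldl_map]; rfl
  rw [h1, PySem.Dict.getD_foldl_modify_append]
  simp [PySem.Dict.getD_empty, List.filter_map, List.map_map, Function.comp_def, Prod.swap]

lemma buckets_keys (hs : List (String × Int)) :
    (hs.foldl (fun bk p => bk.modify p.2 [] (fun l => l ++ [p.1])) (PySem.Dict.empty : PySem.Dict Int (List String))).keys
      = PySem.Set.ofList (hs.map (fun p => p.2)) := by
  have := PySem.Dict.keys_foldl_modify_key hs (fun p => p.2) ([] : List String)
      (fun _ p => fun l => l ++ [p.1]) PySem.Dict.empty
  simpa [PySem.Set.update_nil_left, PySem.Dict.keys_empty] using this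

lemma elems_eq (d : PySem.Dict String Int) (hnd : d.keys.Nodup) (lv : Int) :
    d.keys.foldl (fun acc e => if d.getD e 0 == lv then acc ++ [e] else acc) []
      = (d.items.filter (fun p => p.2 == lv)).map (fun p => p.1) := by
  rw [PySem.List.foldl_append_if_eq_filter]
  have hk : d.keys = d.items.map Prod.fst := by simp [PySem.Dict.keys]
  rw [hk, List.filter_map]
  simp only [List.nil_append]
  congr 1
  apply List.filter_congr
  intro p hp
  have := PySem.Dict.getD_of_mem_items d (k := p.1) (v := p.2) (by simpa using hp) hnd 0
  simp [this]

def relMap (hs : List (String × Int)) (yp : PySem.Dict Int Int)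
    (c : PySem.Dict String (Int × Int)) : List (String × Int × Int) :=
  hs.map (fun p => (p.1, c.getD p.1 (0, -(yp.getD p.2 0))))

lemma inner_sim (hs : List (String × Int)) (hnd : (hs.map Prod.fst).Nodup)
    (yp : PySem.Dict Int Int) (es : List String) (j : Int) :
    ∀ (i0 : Int) (pos c : PySem.Dict String (Int × Int)),
    pos.items = relMap hs yp c →
    (∀ e ∈ es, ∃ h, (e, h) ∈ hs ∧ yp.getD h 0 = j * 2 ∧ c.contains e = false) →
    es.Nodup →
    (es.foldl (fun (st2 : PySem.Dict String (Int × Int) × Int) e =>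
        (st2.1.insert e (st2.2, (st2.1.getD e (0, 0)).2), st2.2 + 6)) (pos, 2 * j + 6 * i0)).1.items
      = relMap hs yp ((PySem.List.enumerate es i0).foldl
          (fun c ie => c.insert ie.2 (2 * j + 6 * ie.1, -2 * j)) c) := by
  induction es with
  | nil => intro i0 pos c hrel _ _; simpa [PySem.List.enumerate] using hrel
  | cons e rest ih =>
    intro i0 pos c hrel hes hnes
    obtain ⟨h, hmem, hyph, hcon⟩ := hes e (List.mem_cons_self ..)
    -- pos's keys are hs's keys
    have hposkeys : pos.keys = hs.map Prod.fst := by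
      simp [PySem.Dict.keys, hrel, relMap, List.map_map]
    have hposnd : pos.keys.Nodup := by rw [hposkeys]; exact hnd
    -- pos.getD e (0,0) = the initial value (e not yet placed)
    have hitem : (e, c.getD e (0, -(yp.getD h 0))) ∈ pos.items := by
      rw [hrel]; exact List.mem_map.mpr ⟨(e, h), hmem, rfl⟩
    have hgd : pos.getD e (0, 0) = (0, -(yp.getD h 0)) := by
      rw [PySem.Dict.getD_of_mem_items pos hitem hposnd,
        PySem.Dict.getD_of_not_contains _ _ hcon]
    have hcontains : pos.contains e = true := by
      rw [PySem.Dict.contains_iff_mem_keys, hposkeys]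
      exact List.mem_map.mpr ⟨(e, h), hmem, rfl⟩
    -- one step of A's loop preserves the relation against one insert on B's side
    have hstep : (pos.insert e (2 * j + 6 * i0, (pos.getD e (0, 0)).2)).items
        = relMap hs yp (c.insert e (2 * j + 6 * i0, -2 * j)) := by
      rw [PySem.Dict.items_insert_of_contains pos _ hcontains, hrel]
      simp only [relMap, List.map_map]
      apply List.map_congr_left
      intro p hp
      by_cases hpe : p.1 = e
      · subst hpe
        simp only [Function.comp_apply, BEq.rfl, if_pos, PySem.Dict.getD_insert]
        have h2 : p.2 = h := keyval_unique hs hnd hp hmem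
        rw [hgd, hyph]
        simp; ring
      · simp only [Function.comp_apply, PySem.Dict.getD_insert, beq_iff_eq, hpe,
          if_false]
    -- assemble with the induction hypothesis at i0 + 1
    have hstate : (2 * j + 6 * i0) + 6 = 2 * j + 6 * (i0 + 1) := by ring
    simp only [List.foldl_cons, PySem.List.enumerate, hstate]
    rw [ih (i0 + 1) _ _ hstep ?_ (List.Nodup.of_cons hnes)]
    intro e' he'
    obtain ⟨h', hm', hy', hc'⟩ := hes e' (List.mem_cons_of_mem _ he')
    refine ⟨h', hm', hy', ?_⟩
    rw [PySem.Dict.contains_insert]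
    have : e' ≠ e := by rintro rfl; exact (List.nodup_cons.mp hnes).1 he'
    simp [this, hc']

lemma outer_sim (hs : List (String × Int)) (hnd : (hs.map Prod.fst).Nodup)
    (yp : PySem.Dict Int Int) (es : Int → List String)
    (hesNd : ∀ lv, (es lv).Nodup)
    (hesIn : ∀ lv e, e ∈ es lv → (e, lv) ∈ hs) :
    ∀ (lvls : List Int) (j0 : Int) (pos c : PySem.Dict String (Int × Int)),
    pos.items = relMap hs yp c →
    (∀ (t : Nat) (ht : t < lvls.length), yp.getD (lvls[t]'ht) 0 = (j0 + (t : Int)) * 2) →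
    lvls.Nodup →
    (∀ p ∈ hs, p.2 ∈ lvls → c.contains p.1 = false) →
    (lvls.foldl (fun (st : PySem.Dict String (Int × Int) × Int) level =>
        (((es level).foldl (fun (st2 : PySem.Dict String (Int × Int) × Int) e =>
            (st2.1.insert e (st2.2, (st2.1.getD e (0, 0)).2), st2.2 + 6)) (st.1, st.2)).1,
         st.2 + 2)) (pos, 2 * j0)).1.items
      = relMap hs yp ((PySem.List.enumerate lvls j0).foldl
          (fun c rl => (PySem.List.enumerate (es rl.2) 0).foldl
              (fun c ie => c.insert ie.2 (2 * rl.1 + 6 * ie.1, -2 * rl.1)) c) c) := by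
  intro lvls
  induction lvls with
  | nil => intro j0 pos c hrel _ _ _; simpa [PySem.List.enumerate] using hrel
  | cons lv rest ih =>
    intro j0 pos c hrel hyp hnl hc
    simp only [List.foldl_cons, PySem.List.enumerate]
    -- the inner level: A's sweep = B's enumerate inserts
    have hy0 : yp.getD lv 0 = j0 * 2 := by
      have := hyp 0 (by simp)
      simpa using this
    have hI := inner_sim hs hnd yp (es lv) j0 0 pos c hrel ?hes (hesNd lv)
    case hes =>
      intro e he
      exact ⟨lv, hesIn lv e he, hy0, hc (e, lv) (hesIn lv e he) (List.mem_cons_self ..)⟩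
    have h60 : (2 * j0 + 6 * 0 : Int) = 2 * j0 := by ring
    rw [h60] at hI
    -- the new coord dict after this level
    set c' := (PySem.List.enumerate (es lv) 0).foldl
        (fun c ie => c.insert ie.2 (2 * j0 + 6 * ie.1, -2 * j0)) c with hc'def
    have hkeys : c'.keys = PySem.Set.update c.keys (es lv) := by
      rw [hc'def, PySem.Dict.keys_foldl_insert_key (PySem.List.enumerate (es lv) 0)
        (fun ie => ie.2) (fun _ ie => (2 * j0 + 6 * ie.1, -2 * j0)) c, enum_snd]
    have hstate : (2 * j0 + 2 : Int) = 2 * (j0 + 1) := by ring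
    rw [hstate]
    refine ih (j0 + 1) _ c' hI ?_ (List.Nodup.of_cons hnl) ?_
    · intro t ht
      have := hyp (t + 1) (by simpa using ht)
      rw [show ((lv :: rest)[t+1]'(by simpa using ht) = rest[t]'ht) from rfl] at this
      rw [this]; push_cast; ring
    · intro p hp hprest
      have hmemkeys : p.1 ∉ c'.keys := by
        rw [hkeys]
        intro hm
        rcases (PySem.Set.mem_update _ _ _).mp hm with hm1 | hm2
        · have hfalse := hc p hp (List.mem_cons_of_mem _ hprest)
          rw [← PySem.Dict.contains_iff_mem_keys _ _] at hm1
          rw [hfalse] at hm1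
          exact Bool.false_ne_true hm1
        · have h1 : (p.1, lv) ∈ hs := hesIn lv p.1 hm2
          have h2 : (p.1, p.2) ∈ hs := by simpa using hp
          have : lv = p.2 := keyval_unique hs hnd h1 h2
          exact (List.nodup_cons.mp hnl).1 (this ▸ hprest)
      cases hcc : c'.contains p.1 with
      | false => rfl
      | true => exact absurd ((PySem.Dict.contains_iff_mem_keys _ _).mp hcc) hmemkeys

lemma coord_mem (es : Int → List String) :
    ∀ (lvls : List Int) (j0 : Int) (c : PySem.Dict String (Int × Int)) (k : String),
    (k ∈ c.keys ∨ ∃ lv ∈ lvls, k ∈ es lv) →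
    k ∈ ((PySem.List.enumerate lvls j0).foldl
        (fun c rl => (PySem.List.enumerate (es rl.2) 0).foldl
            (fun c ie => c.insert ie.2 (2 * rl.1 + 6 * ie.1, -2 * rl.1)) c) c).keys := by
  intro lvls
  induction lvls with
  | nil =>
    intro j0 c k hk
    rcases hk with hk | ⟨lv, hlv, _⟩
    · simpa [PySem.List.enumerate] using hk
    · simp at hlv
  | cons lv rest ih =>
    intro j0 c k hk
    simp only [PySem.List.enumerate, List.foldl_cons]
    set c' := (PySem.List.enumerate (es lv) 0).foldl
        (fun c ie => c.insert ie.2 (2 * j0 + 6 * ie.1, -2 * j0)) c with hc'def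
    have hkeys : c'.keys = PySem.Set.update c.keys (es lv) := by
      rw [hc'def, PySem.Dict.keys_foldl_insert_key (PySem.List.enumerate (es lv) 0)
        (fun ie => ie.2) (fun _ ie => (2 * j0 + 6 * ie.1, -2 * j0)) c, enum_snd]
    apply ih (j0 + 1) c' k
    rcases hk with hk | ⟨lv', hlv', hes'⟩
    · left; rw [hkeys]; exact (PySem.Set.mem_update _ _ _).mpr (Or.inl hk)
    · rcases List.mem_cons.mp hlv' with rfl | hrest
      · left; rw [hkeys]; exact (PySem.Set.mem_update _ _ _).mpr (Or.inr hes')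
      · right; exact ⟨lv', hrest, hes'⟩


lemma master (hs : List (String × Int)) (hnd : (hs.map Prod.fst).Nodup)
    (yp : PySem.Dict Int Int) (es : Int → List String) (L : List Int)
    (hesNd : ∀ lv, (es lv).Nodup)
    (hesIn : ∀ lv e, e ∈ es lv → (e, lv) ∈ hs)
    (hesCov : ∀ p ∈ hs, p.1 ∈ es p.2)
    (hLnd : L.Nodup)
    (hLmem : ∀ p ∈ hs, p.2 ∈ L)
    (hypL : ∀ (t : Nat) (ht : t < L.length), yp.getD (L[t]'ht) 0 = (t : Int) * 2) :
    (L.foldl (fun (st : PySem.Dict String (Int × Int) × Int) level =>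
        (((es level).foldl (fun (st2 : PySem.Dict String (Int × Int) × Int) e =>
            (st2.1.insert e (st2.2, (st2.1.getD e (0, 0)).2), st2.2 + 6)) (st.1, st.2)).1,
         st.2 + 2))
      (hs.foldl (fun ps p => ps.insert p.1 (0, -(yp.getD p.2 0))) PySem.Dict.empty, 0)).1.items
    = hs.map (fun p => (p.1, ((PySem.List.enumerate L 0).foldl
        (fun c rl => (PySem.List.enumerate (es rl.2) 0).foldl
            (fun c ie => c.insert ie.2 (2 * rl.1 + 6 * ie.1, -2 * rl.1)) c) PySem.Dict.empty).getD p.1 (0, 0))) := by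
  have hrel0 : (hs.foldl (fun ps p => ps.insert p.1 (0, -(yp.getD p.2 0))) PySem.Dict.empty).items
      = relMap hs yp PySem.Dict.empty := by
    rw [pos0_items hs hnd yp]; simp [relMap, PySem.Dict.getD_empty]
  have houter := outer_sim hs hnd yp es hesNd hesIn L 0 _ PySem.Dict.empty hrel0
      (by intro t ht; rw [hypL t ht]; ring) hLnd
      (by intro p _ _; simp [PySem.Dict.contains_empty])
  have houter' : ∀ x0 : Int, x0 = 2 * 0 →
      (L.foldl (fun (st : PySem.Dict String (Int × Int) × Int) level =>
        (((es level).foldl (fun (st2 : PySem.Dict String (Int × Int) × Int) e =>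
            (st2.1.insert e (st2.2, (st2.1.getD e (0, 0)).2), st2.2 + 6)) (st.1, st.2)).1,
         st.2 + 2))
        (hs.foldl (fun ps p => ps.insert p.1 (0, -(yp.getD p.2 0))) PySem.Dict.empty, x0)).1.items
      = relMap hs yp ((PySem.List.enumerate L 0).foldl
          (fun c rl => (PySem.List.enumerate (es rl.2) 0).foldl
              (fun c ie => c.insert ie.2 (2 * rl.1 + 6 * ie.1, -2 * rl.1)) c) PySem.Dict.empty) := by
    intro x0 hx; rw [hx]; exact houter
  rw [houter' 0 (by norm_num)]
  unfold relMap
  apply List.map_congr_left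
  intro p hp
  have hcont : ((PySem.List.enumerate L 0).foldl
      (fun c rl => (PySem.List.enumerate (es rl.2) 0).foldl
          (fun c ie => c.insert ie.2 (2 * rl.1 + 6 * ie.1, -2 * rl.1)) c)
      (PySem.Dict.empty : PySem.Dict String (Int × Int))).contains p.1 = true := by
    refine (PySem.Dict.contains_iff_mem_keys _ _).mpr ?_
    exact coord_mem es L 0 PySem.Dict.empty p.1 (Or.inr ⟨p.2, hLmem p hp, hesCov p hp⟩)
  rw [dict_getD_eq_of_contains _ _ hcont (0, -(yp.getD p.2 0)) (0, 0)]

theorem ports_eq (heights : List (String × Int)) :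
    correct_position_of_graph_nodes heights = correct_position_of_graph_nodes_alt heights := by
  unfold correct_position_of_graph_nodes correct_position_of_graph_nodes_alt
  set d : PySem.Dict String Int := PySem.Dict.ofList heights with hd
  have hnd' : d.keys.Nodup := by rw [hd]; exact PySem.Dict.nodup_keys_ofList heights
  have hnd : (d.items.map Prod.fst).Nodup := by simpa [PySem.Dict.keys] using hnd'
  simp only [PySem.Dict.values, buckets_keys d.items, buckets_getD d.items, elems_eq d hnd']
  apply master d.items hnd _ _ _ ?hesNd ?hesIn ?hesCov ?hLnd ?hLmem ?hypL
  case hesNd =>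
    intro lv
    refine ((PySem.List.sorted_perm _ _ _).nodup_iff).mpr (hnd.sublist ?_)
    exact List.Sublist.map _ List.filter_sublist
  case hesIn =>
    intro lv e he
    have hm := ((PySem.List.sorted_perm _ _ _).mem_iff).mp he
    obtain ⟨p, hpf, rfl⟩ := List.mem_map.mp hm
    obtain ⟨hp, heq⟩ := List.mem_filter.mp hpf
    rw [beq_iff_eq] at heq
    simpa [← heq] using hp
  case hesCov =>
    intro p hp
    refine ((PySem.List.sorted_perm _ _ _).mem_iff).mpr ?_
    exact List.mem_map.mpr ⟨p, List.mem_filter.mpr ⟨hp, by simp⟩, rfl⟩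
  case hLnd =>
    exact ((PySem.List.sorted_perm _ _ _).nodup_iff).mpr (PySem.Set.nodup_ofList _)
  case hLmem =>
    intro p hp
    refine ((PySem.List.sorted_perm _ _ _).mem_iff).mpr ?_
    exact (PySem.Set.mem_ofList _ _).mpr (List.mem_map.mpr ⟨p, hp, rfl⟩)
  case hypL =>
    intro t ht
    exact yPos_at _ (((PySem.List.sorted_perm _ _ _).nodup_iff).mpr (PySem.Set.nodup_ofList _)) t ht

-- ===== VERDICT (by name: the statement is the Claim_ definition above) =====
theorem correct_position_of_graph_nodes_spec : Claim_equal_correct_position_of_graph_nodes := by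
  intro heights _
  unfold Spec_correct_position_of_graph_nodes
  exact ports_eq heights
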